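-- pv_equiv track=rewrite | github.com/VoidRayXX/Progra-USM | Tareas de Progra/Tarea 10 José González.py | stock_marca
-- ===== SOURCE A (Python) =====
-- def stock_marca(marca, lista_productos, lista_stock):
--     productos_copia = list(lista_productos)
--     stock_copia = list(lista_stock)
--     stock = 0
--     modelos = []
--     for datos in productos_copia:
--         if datos[1].lower() == marca.lower():
--             modelos.append(datos[0])
--     i = 0
--     for costo in stock_copia:
--         if costo[0] in modelos:
--             stock += stock_copia[i][2]
--         i += 1
--     return stock
-- ===== SOURCE B (Python) =====
-- def stock_marca(marca, lista_productos, lista_stock):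
--     # aggregate stock per model once
--     stock_por_modelo = {}
--     for c in lista_stock:
--         stock_por_modelo[c[0]] = stock_por_modelo.get(c[0], 0) + c[2]
--     objetivo = marca.lower()
--     # distinct models of the matching brand
--     modelos = set()
--     for p in lista_productos:
--         if p[1].lower() == objetivo:
--             modelos.add(p[0])
--     total = 0
--     for m in modelos:
--         total += stock_por_modelo.get(m, 0)
--     return total
-- ===== Notes on version B (the rewrite author's own statement) =====
-- stated objective: faster
-- what changed: B aggregates stock per model in one dict pass and sums the aggregate over the set of distinct matching models, replacing A's per-stock-row linear scan of the matching-model list (and its redundant indexed re-lookup).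
import Mathlib
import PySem

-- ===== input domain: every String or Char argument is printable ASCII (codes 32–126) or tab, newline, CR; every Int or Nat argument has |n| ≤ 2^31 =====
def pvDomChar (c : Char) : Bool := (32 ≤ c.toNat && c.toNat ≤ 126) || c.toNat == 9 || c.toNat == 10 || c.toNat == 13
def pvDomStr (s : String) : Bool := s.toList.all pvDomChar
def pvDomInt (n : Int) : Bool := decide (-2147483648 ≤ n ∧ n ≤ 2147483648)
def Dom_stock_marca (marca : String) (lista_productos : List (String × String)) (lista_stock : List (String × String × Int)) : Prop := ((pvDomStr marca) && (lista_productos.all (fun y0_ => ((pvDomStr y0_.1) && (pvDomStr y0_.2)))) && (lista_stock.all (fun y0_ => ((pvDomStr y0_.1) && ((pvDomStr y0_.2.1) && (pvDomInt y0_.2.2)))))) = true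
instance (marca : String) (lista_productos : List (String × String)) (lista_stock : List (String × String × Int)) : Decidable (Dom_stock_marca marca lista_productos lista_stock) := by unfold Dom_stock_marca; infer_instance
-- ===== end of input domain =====

-- B replaces A's per-stock-row scan of the matching-model list by a per-model stock dict
-- summed over the set of distinct matching models (objective: faster).

-- ===== PORT A =====
-- literal port of A; the loop 'for costo in stock_copia' carries the manual index i and
-- re-reads stock_copia[i][2] (pyGet?; always in range here, .elim 0 never fires on the sum)
def stock_marca (marca : String) (lista_productos : List (String × String)) (lista_stock : List (String × String × Int)) : Int :=
  let productos_copia := lista_productos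
  let stock_copia := lista_stock
  let modelos : List String :=
    productos_copia.foldl
      (fun ms datos => if PySem.Str.lower datos.2 == PySem.Str.lower marca then ms ++ [datos.1] else ms) []
  let r :=
    stock_copia.foldl
      (fun (p : Int × Int) costo =>
        (if modelos.contains costo.1 then
            p.1 + ((PySem.List.pyGet? stock_copia p.2).elim 0 (·.2.2))
          else p.1,
         p.2 + 1))
      ((0 : Int), (0 : Int))
  r.1

-- ===== PORT B =====
def stock_marca_alt (marca : String) (lista_productos : List (String × String)) (lista_stock : List (String × String × Int)) : Int :=
  let stock_por_modelo : PySem.Dict String Int :=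
    lista_stock.foldl (fun d c => d.insert c.1 (d.getD c.1 0 + c.2.2)) PySem.Dict.empty
  let objetivo := PySem.Str.lower marca
  let modelos : PySem.Set String :=
    lista_productos.foldl
      (fun s p => if PySem.Str.lower p.2 == objetivo then PySem.Set.add s p.1 else s)
      PySem.Set.empty
  modelos.foldl (fun total m => total + stock_por_modelo.getD m 0) 0

-- ===== PRECONDITION & SPEC =====
def Spec_stock_marca (marca : String) (lista_productos : List (String × String)) (lista_stock : List (String × String × Int)) (out : Int) : Prop := out = stock_marca_alt marca lista_productos lista_stock
instance (marca : String) (lista_productos : List (String × String)) (lista_stock : List (String × String × Int)) (out : Int) : Decidable (Spec_stock_marca marca lista_productos lista_stock out) := by unfold Spec_stock_marca; infer_instance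

-- ===== CLAIM (what is proved, stated in full; the proofs are below) =====
def Claim_equal_stock_marca : Prop := ∀ (marca : String) (lista_productos : List (String × String)) (lista_stock : List (String × String × Int)), Dom_stock_marca marca lista_productos lista_stock → Spec_stock_marca marca lista_productos lista_stock (stock_marca marca lista_productos lista_stock)

-- ===== LEMMAS AND PROOFS =====

-- per-model total of a stock list
def pvTm (m : String) (stock : List (String × String × Int)) : Int :=
  ((stock.filter (fun c => c.1 == m)).map (·.2.2)).sum

-- A's indexed fold over the stock equals the plain conditional sum
theorem pvA_idx_fold (modelos : List String) :
    ∀ (suf pre : List (String × String × Int)) (s : Int),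
      (suf.foldl
        (fun (p : Int × Int) costo =>
          (if modelos.contains costo.1 then
              p.1 + ((PySem.List.pyGet? (pre ++ suf) p.2).elim 0 (·.2.2))
            else p.1,
           p.2 + 1))
        (s, (pre.length : Int))).1
      = suf.foldl (fun s c => if modelos.contains c.1 then s + c.2.2 else s) s := by
  intro suf
  induction suf with
  | nil => intro pre s; rfl
  | cons c rest ih =>
    intro pre s
    have hfull : pre ++ c :: rest = (pre ++ [c]) ++ rest := by simp
    have hget : PySem.List.pyGet? (pre ++ c :: rest) (pre.length : Int) = some c :=
      PySem.List.pyGet?_append_length pre rest c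
    have hlen : ((pre.length : Int) + 1) = (((pre ++ [c]).length : Nat) : Int) := by
      simp
    simp only [List.foldl_cons, hget, Option.elim]
    by_cases h : modelos.contains c.1
    · simp only [h, if_pos]
      rw [hlen, hfull]
      exact ih (pre ++ [c]) (s + c.2.2)
    · simp only [h, Bool.false_eq_true, if_false]
      rw [hlen, hfull]
      exact ih (pre ++ [c]) s

-- conditional accumulation = sum over the filtered list
theorem pvCondFold (p : (String × String × Int) → Bool) :
    ∀ (l : List (String × String × Int)) (a : Int),
      l.foldl (fun s c => if p c then s + c.2.2 else s) a
        = a + ((l.filter p).map (·.2.2)).sum := by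
  intro l
  induction l with
  | nil => intro a; simp
  | cons c rest ih =>
    intro a
    by_cases h : p c
    · simp [h, ih]; ring
    · simp [h, ih]

-- the per-model dict built by B: its lookup is the per-model total
theorem pvDictFold :
    ∀ (stock : List (String × String × Int)) (d : PySem.Dict String Int) (m : String),
      (stock.foldl (fun d c => d.insert c.1 (d.getD c.1 0 + c.2.2)) d).getD m 0
        = d.getD m 0 + pvTm m stock := by
  intro stock
  induction stock with
  | nil => intro d m; simp [pvTm]
  | cons c rest ih =>
    intro d m
    simp only [List.foldl_cons, ih]
    rw [PySem.Dict.getD_insert]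
    by_cases h : m = c.1
    · subst h
      simp [pvTm]
      ring
    · have hb : (c.1 == m) = false := by
        simp only [beq_eq_false_iff_ne, ne_eq]
        exact fun h' => h h'.symm
      simp [pvTm, hb, PySem.Dict.getD, h]

-- summing an if over a nodup list of models
theorem pvSumIf (x : String) (v : Int) :
    ∀ (S : List String), S.Nodup →
      (S.map (fun m => if x == m then v else 0)).sum = if S.contains x then v else 0 := by
  intro S
  induction S with
  | nil => intro _; simp
  | cons m rest ih =>
    intro hnd
    have hnd' := (List.nodup_cons.mp hnd).2
    have hx := (List.nodup_cons.mp hnd).1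
    by_cases h : x = m
    · subst h
      have hc : rest.contains x = false := by simpa using hx
      rw [List.map_cons, List.sum_cons, ih hnd', hc]
      simp
    · have hb : (x == m) = false := by simpa using h
      rw [List.map_cons, List.sum_cons, ih hnd']
      have hcc : (m :: rest).contains x = rest.contains x := by
        simp [h]
      rw [hcc]
      simp [hb]

-- exchanging the two summations
theorem pvSwap (S : List String) (hnd : S.Nodup) :
    ∀ (stock : List (String × String × Int)),
      (S.map (fun m => pvTm m stock)).sum
        = ((stock.filter (fun c => S.contains c.1)).map (·.2.2)).sum := by
  intro stock
  induction stock with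
  | nil => simp [pvTm]
  | cons c rest ih =>
    have hstep : ∀ m, pvTm m (c :: rest) = (if c.1 == m then c.2.2 else 0) + pvTm m rest := by
      intro m
      by_cases h : (c.1 == m) <;> simp [pvTm, h]
    calc (S.map (fun m => pvTm m (c :: rest))).sum
        = (S.map (fun m => (if c.1 == m then c.2.2 else 0) + pvTm m rest)).sum := by
          simp only [hstep]
      _ = (S.map (fun m => if c.1 == m then c.2.2 else 0)).sum
            + (S.map (fun m => pvTm m rest)).sum := by
          rw [← List.sum_map_add]
      _ = (if S.contains c.1 then c.2.2 else 0)
            + ((rest.filter (fun c => S.contains c.1)).map (·.2.2)).sum := by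
          rw [pvSumIf c.1 c.2.2 S hnd, ih]
      _ = ((( c :: rest).filter (fun c => S.contains c.1)).map (·.2.2)).sum := by
          by_cases h : c.1 ∈ S
          · simp [h]
          · simp [h]

-- B's matching-set loop is set(map fst (filter pred productos))
theorem pvSetFold (pred : (String × String) → Bool) :
    ∀ (l : List (String × String)) (s : PySem.Set String),
      l.foldl (fun s p => if pred p then PySem.Set.add s p.1 else s) s
        = PySem.Set.update s ((l.filter pred).map (·.1)) := by
  intro l
  induction l with
  | nil => intro s; rfl
  | cons p rest ih =>
    intro s
    by_cases h : pred p <;> simp [h, ih, PySem.Set.update]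

theorem pvFoldAdd (f : String → Int) :
    ∀ (S : List String) (a : Int), S.foldl (fun t m => t + f m) a = a + (S.map f).sum := by
  intro S
  induction S with
  | nil => intro a; simp
  | cons m rest ih => intro a; simp [ih]; ring

theorem stock_marca_eq (marca : String) (lista_productos : List (String × String)) (lista_stock : List (String × String × Int)) :
    stock_marca marca lista_productos lista_stock = stock_marca_alt marca lista_productos lista_stock := by
  unfold stock_marca stock_marca_alt
  simp only []
  set pred : (String × String) → Bool :=
    fun datos => PySem.Str.lower datos.2 == PySem.Str.lower marca with hpred
  -- A's model list
  have hM : (lista_productos.foldl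
      (fun ms datos => if pred datos then ms ++ [datos.1] else ms) ([] : List String))
      = (lista_productos.filter pred).map (·.1) := by
    simpa using PySem.List.foldl_append_if pred (·.1) (l := lista_productos) (acc := [])
  set M : List String := (lista_productos.filter pred).map (·.1) with hMdef
  -- B's model set
  have hS : (lista_productos.foldl
      (fun s p => if pred p then PySem.Set.add s p.1 else s) PySem.Set.empty)
      = PySem.Set.ofList M := by
    rw [pvSetFold pred lista_productos PySem.Set.empty]
    exact PySem.Set.update_nil_left _
  set S : List String := PySem.Set.ofList M with hSdef
  have hmem : ∀ x, S.contains x = M.contains x := by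
    intro x
    by_cases h : x ∈ M
    · simp [h, hSdef, PySem.Set.mem_ofList]
    · simp [h, hSdef, PySem.Set.mem_ofList]
  -- A's value
  have hidx := pvA_idx_fold M lista_stock [] 0
  simp only [List.nil_append, List.length_nil, Nat.cast_zero] at hidx
  rw [hM, hidx, pvCondFold (fun c => M.contains c.1) lista_stock 0]
  -- B's value
  rw [hS, pvFoldAdd (fun m =>
    (lista_stock.foldl (fun d c => d.insert c.1 (d.getD c.1 0 + c.2.2)) PySem.Dict.empty).getD m 0) S 0]
  have hd : ∀ m, (lista_stock.foldl (fun d c => d.insert c.1 (d.getD c.1 0 + c.2.2)) PySem.Dict.empty).getD m 0 = pvTm m lista_stock := by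
    intro m; rw [pvDictFold lista_stock PySem.Dict.empty m]; simp [PySem.Dict.getD, PySem.Dict.empty, PySem.Dict.get?]
  simp only [hd]
  rw [pvSwap S (hSdef ▸ PySem.Set.nodup_ofList M) lista_stock]
  have : lista_stock.filter (fun c => S.contains c.1) = lista_stock.filter (fun c => M.contains c.1) := by
    apply List.filter_congr; intro c _; exact hmem c.1
  rw [this]

-- ===== VERDICT (by name: the statement is the Claim_ definition above) =====
theorem stock_marca_spec : Claim_equal_stock_marca := by
  intro marca lp ls _
  unfold Spec_stock_marca
  exact stock_marca_eq marca lp ls
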